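-- pv_equiv track=rewrite | github.com/miliar/Code_Jam_Webscraper | solutions_python/Problem_200/2498.py | declement
-- ===== SOURCE A (Python) =====
-- def declement(num):
--     u"""逆順の配列"""
--     ret = []
--     if num[0] == 0:
--         ret.append(9)
--         new_num = declement(num[1:])
--         if len(new_num) == 1 and new_num[0] == 0:
--             return ret
--         else:
--             return ret + new_num
--     else:
--         num[0] -= 1
--         return num
-- ===== SOURCE B (Python) =====
-- def declement(num):
--     u"""逆順の配列"""
--     if num[0] != 0:
--         num[0] -= 1
--         return num
--     ret = []
--     i = 0
--     while num[i] == 0: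
--         ret.append(9)
--         i += 1
--     tail = num[i:]
--     tail[0] -= 1
--     return ret if tail == [0] else ret + tail
-- ===== Notes on version B (the rewrite author's own statement) =====
-- stated objective: alternative
-- what changed: Replaces A's per-zero recursion (one call frame and one list concatenation per leading zero) with a single iterative scan that counts leading zeros into a run of 9s and builds the result with one slice and one concatenation.
-- outside the precondition, e.g. on declement([0, 0]): A raises IndexError, B raises IndexError; on declement([]): A raises IndexError, B raises IndexError
import Mathlib
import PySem

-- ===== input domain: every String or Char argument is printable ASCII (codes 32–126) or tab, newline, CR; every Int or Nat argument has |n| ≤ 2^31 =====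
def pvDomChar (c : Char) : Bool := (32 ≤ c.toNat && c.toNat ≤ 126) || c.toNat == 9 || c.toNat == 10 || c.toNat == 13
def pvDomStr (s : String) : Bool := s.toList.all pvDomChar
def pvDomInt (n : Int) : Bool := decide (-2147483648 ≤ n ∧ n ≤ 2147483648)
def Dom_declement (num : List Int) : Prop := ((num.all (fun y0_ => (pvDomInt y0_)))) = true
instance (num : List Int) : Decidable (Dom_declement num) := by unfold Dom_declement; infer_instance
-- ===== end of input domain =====

-- B changes the decomposition (iterative scan over leading zeros instead of A's per-zero recursion);
-- the equivalence is about return values; both versions mutate num[0] in place only in the fast path.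

-- ===== PORT A =====
-- A recurses: leading 0 becomes a 9, recurse on the tail; a recursive result [0] is trimmed away.
def declement (num : List Int) : List Int :=
  match num with
  | [] => []                -- num[0] raises IndexError in Python; excluded by Pre_declement
  | h :: t =>
    if h = 0 then
      let new_num := declement t
      if new_num.length = 1 ∧ new_num.headD 0 = 0 then [9]
      else 9 :: new_num
    else (h - 1) :: t

-- ===== PORT B =====
-- B's while loop: peel leading zeros, collecting a 9 for each, returning the remaining tail.
def altZeros (num : List Int) : List Int × List Int :=
  match num with
  | [] => ([], [])          -- index ran off the end: IndexError in Python; excluded by Pre_declement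
  | h :: t =>
    if h = 0 then
      let p := altZeros t
      (9 :: p.1, p.2)
    else ([], h :: t)

def declement_alt (num : List Int) : List Int :=
  match num with
  | [] => []                -- num[0] raises IndexError in Python; excluded by Pre_declement
  | h :: t =>
    if h ≠ 0 then (h - 1) :: t
    else
      let p := altZeros (h :: t)
      match p.2 with
      | [] => []            -- unreachable under Pre_declement (tail[0] would raise)
      | th :: tt =>
        let tail := (th - 1) :: tt
        if tail = [0] then p.1 else p.1 ++ tail

-- ===== PRECONDITION & SPEC =====
-- Pre_ excludes exactly the inputs on which Python A raises IndexError: lists whose digits are all zero (including []).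
def Pre_declement (num : List Int) : Prop := ∃ x ∈ num, x ≠ 0
instance (num : List Int) : Decidable (Pre_declement num) := by unfold Pre_declement; infer_instance
def pvWitness_declement : List Int := [0, 2, 1]

def Spec_declement (num : List Int) (out : List Int) : Prop := out = declement_alt num
instance (num : List Int) (out : List Int) : Decidable (Spec_declement num out) := by unfold Spec_declement; infer_instance

-- ===== CLAIM (what is proved, stated in full; the proofs are below) =====
def Claim_equal_declement : Prop := ∀ (num : List Int), Dom_declement num → Pre_declement num → Spec_declement num (declement num)

-- ===== LEMMAS AND PROOFS =====

lemma len_head_eq_single (l : List Int) : (l.length = 1 ∧ l.headD 0 = 0) ↔ l = [0] := by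
  cases l with
  | nil => simp
  | cons a t => cases t <;> simp [List.headD]

lemma altZeros_snd_ne (t : List Int) (ht : ∃ x ∈ t, x ≠ 0) : (altZeros t).2 ≠ [] := by
  induction t with
  | nil => simp at ht
  | cons h t ih =>
    by_cases hz : h = 0
    · subst hz
      simp only [altZeros, reduceIte]
      exact ih (by simpa using ht)
    · simp [altZeros, hz]

lemma alt_head_ne_nil (t : List Int) (ht : ∃ x ∈ t, x ≠ 0) :
    declement_alt (0 :: t) ≠ [0] ∧
    declement_alt (0 :: t) =
      (if declement_alt t = [0] then [9] else 9 :: declement_alt t) := by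
  cases t with
  | nil => simp at ht
  | cons h' t' =>
    by_cases hz : h' = 0
    · subst hz
      have ht' : ∃ x ∈ t', x ≠ 0 := by simpa using ht
      have hne := altZeros_snd_ne t' ht'
      cases htl : (altZeros t').2 with
      | nil => exact absurd htl hne
      | cons th tt =>
        simp only [declement_alt, altZeros, reduceIte, htl, ne_eq, not_true_eq_false]
        by_cases h0 : (th - 1) :: tt = [0] <;>
          simp [h0]
    · constructor
      · simp only [declement_alt, altZeros, if_neg hz, ne_eq, if_pos]
        by_cases h0 : (h' - 1) :: t' = [0] <;> simp [h0]
      · simp only [declement_alt, altZeros, reduceIte, ne_eq, not_false_eq_true, if_pos, hz, ite_not]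
        by_cases h0 : (h' - 1) :: t' = [0] <;> simp [h0]

lemma declement_eq_alt (num : List Int) (hp : Pre_declement num) :
    declement num = declement_alt num := by
  induction num with
  | nil => simp [Pre_declement] at hp
  | cons h t ih =>
    by_cases hz : h = 0
    · subst hz
      have ht : ∃ x ∈ t, x ≠ 0 := by
        rcases hp with ⟨x, hx, hxn⟩
        rw [List.mem_cons] at hx
        rcases hx with rfl | hx
        · exact absurd rfl hxn
        · exact ⟨x, hx, hxn⟩
      have heq := ih ht
      obtain ⟨_, hB⟩ := alt_head_ne_nil t ht
      rw [hB]
      simp only [declement, len_head_eq_single, heq, if_true]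
    · simp [declement, declement_alt, hz]

-- ===== VERDICT (by name: the statement is the Claim_ definition above) =====
theorem declement_spec : Claim_equal_declement := by
  intro num _ hp
  unfold Spec_declement
  exact declement_eq_alt num hp
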